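-- pv_equiv track=rewrite | github.com/Lmatouu/Galerie_Art | Sous_Programme_MethodeB_MathisVEBER_ArnaudHUCHON_TonTRICOIRE.py | remplace
-- ===== SOURCE A (Python) =====
-- def remplace(ListeA,ListeB):
--      for k in range(len(ListeB)):
--          cordx,cordy=ListeB[k]
--          for i in range((len(ListeA))):
--              pointx,pointy=ListeA[i]
--              if abs(cordx-pointx)<3 and abs(cordy-pointy)<3:
--                  ListeB[k]=ListeA[i]
--      return ListeB
-- ===== SOURCE B (Python) =====
-- def remplace(ListeA, ListeB):
--     # Spatial hash of ListeA by cell size 3; each B point queries its 9 neighbor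
--     # cells and takes the matching A point with the largest index (last match wins,
--     # exactly as A's overwriting scan).  Mutates ListeB in place, like A.
--     grid = {}
--     for i, a in enumerate(ListeA):
--         grid.setdefault((a[0] // 3, a[1] // 3), []).append((i, a))
--     for k in range(len(ListeB)):
--         bx, by = ListeB[k]
--         cx, cy = bx // 3, by // 3
--         best = None
--         for dx in (-1, 0, 1):
--             for dy in (-1, 0, 1):
--                 for (i, p) in grid.get((cx + dx, cy + dy), []):
--                     if abs(bx - p[0]) < 3 and abs(by - p[1]) < 3 and (best is None or best[0] < i):
--                         best = (i, p)
--         if best is not None: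
--             ListeB[k] = best[1]
--     return ListeB
-- ===== Notes on version B (the rewrite author's own statement) =====
-- stated objective: faster
-- what changed: Replaces A's full scan of ListeA for every B point by a spatial hash: A's points are bucketed once by (x//3, y//3) cell, and each B point inspects only the 9 neighbouring cells, taking the matching point of largest index (= A's last-match-wins).
import Mathlib
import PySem

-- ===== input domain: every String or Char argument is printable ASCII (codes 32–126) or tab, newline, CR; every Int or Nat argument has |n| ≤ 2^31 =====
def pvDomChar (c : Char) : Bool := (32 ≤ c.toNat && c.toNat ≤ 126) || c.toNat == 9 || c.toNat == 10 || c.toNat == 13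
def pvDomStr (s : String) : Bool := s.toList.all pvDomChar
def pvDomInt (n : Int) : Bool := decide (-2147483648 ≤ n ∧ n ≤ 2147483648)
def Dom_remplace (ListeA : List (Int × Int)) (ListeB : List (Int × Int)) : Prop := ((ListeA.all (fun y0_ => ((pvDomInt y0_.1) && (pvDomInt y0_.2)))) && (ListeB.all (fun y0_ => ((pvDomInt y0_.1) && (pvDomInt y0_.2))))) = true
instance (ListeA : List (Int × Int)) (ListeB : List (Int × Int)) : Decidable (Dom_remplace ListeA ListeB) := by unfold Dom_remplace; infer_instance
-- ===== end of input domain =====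

-- B replaces A's full rescan of ListeA for every B point by a spatial hash bucketed by
-- (x//3, y//3) cells, querying only the 9 neighbour cells per B point (objective: faster).
-- Both Pythons mutate ListeB in place identically; the theorems are about the return value.

-- ===== PORT A =====
def remplace (ListeA : List (Int × Int)) (ListeB : List (Int × Int)) : List (Int × Int) :=
  (List.range ListeB.length).foldl (fun Bc k =>
    match Bc[k]? with
    | none => Bc
    | some b =>
      ListeA.foldl (fun Bc p =>
        if (b.1 - p.1).natAbs < 3 ∧ (b.2 - p.2).natAbs < 3 then Bc.set k p else Bc) Bc) ListeB

-- ===== PORT B =====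
-- B-side helpers
def pvClose (b p : Int × Int) : Bool :=
  decide ((b.1 - p.1).natAbs < 3) && decide ((b.2 - p.2).natAbs < 3)

def pvCell (p : Int × Int) : Int × Int :=
  (PySem.Int.floordiv p.1 3, PySem.Int.floordiv p.2 3)

-- grid.setdefault((a[0]//3, a[1]//3), []).append((i, a))  over enumerate(ListeA)
def pvGrid (ListeA : List (Int × Int)) : PySem.Dict (Int × Int) (List (Int × (Int × Int))) :=
  (PySem.List.enumerate ListeA 0).foldl
    (fun g e => g.modify (pvCell e.2) [] (· ++ [e])) PySem.Dict.empty

-- the body of the innermost loop: keep the matching candidate of largest index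
def pvStep (b : Int × Int) (best : Option (Int × (Int × Int))) (e : Int × (Int × Int)) :
    Option (Int × (Int × Int)) :=
  if pvClose b e.2 && (match best with | none => true | some f => decide (f.1 < e.1)) then some e
  else best

-- the dx/dy loops over the 9 neighbour cells
def pvQuery (g : PySem.Dict (Int × Int) (List (Int × (Int × Int)))) (b : Int × Int) :
    Option (Int × (Int × Int)) :=
  ([-1, 0, 1] : List Int).foldl (fun best dx =>
    ([-1, 0, 1] : List Int).foldl (fun best dy =>
      (g.getD ((pvCell b).1 + dx, (pvCell b).2 + dy) []).foldl (pvStep b) best) best) none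

def remplace_alt (ListeA : List (Int × Int)) (ListeB : List (Int × Int)) : List (Int × Int) :=
  let g := pvGrid ListeA
  (List.range ListeB.length).foldl (fun Bc k =>
    match Bc[k]? with
    | none => Bc
    | some b =>
      match pvQuery g b with
      | none => Bc
      | some e => Bc.set k e.2) ListeB

-- ===== PRECONDITION & SPEC =====
def Spec_remplace (ListeA : List (Int × Int)) (ListeB : List (Int × Int)) (out : List (Int × Int)) : Prop := out = remplace_alt ListeA ListeB
instance (ListeA : List (Int × Int)) (ListeB : List (Int × Int)) (out : List (Int × Int)) : Decidable (Spec_remplace ListeA ListeB out) := by unfold Spec_remplace; infer_instance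

-- ===== CLAIM (what is proved, stated in full; the proofs are below) =====
def Claim_equal_remplace : Prop := ∀ (ListeA : List (Int × Int)) (ListeB : List (Int × Int)), Dom_remplace ListeA ListeB → Spec_remplace ListeA ListeB (remplace ListeA ListeB)

-- ===== LEMMAS AND PROOFS =====

-- the nine offsets, in the order B's loops visit them
def pvOffs : List (Int × Int) :=
  [(-1, -1), (-1, 0), (-1, 1), (0, -1), (0, 0), (0, 1), (1, -1), (1, 0), (1, 1)]

-- the concatenation of the 9 neighbour-cell candidate lists
def pvCand (ListeA : List (Int × Int)) (b : Int × Int) : List (Int × (Int × Int)) :=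
  pvOffs.flatMap
    (fun o => (PySem.List.enumerate ListeA 0).filter
       (fun e => pvCell e.2 == ((pvCell b).1 + o.1, (pvCell b).2 + o.2)))

theorem pvGrid_getD (ListeA : List (Int × Int)) (c : Int × Int) :
    (pvGrid ListeA).getD c [] =
      (PySem.List.enumerate ListeA 0).filter (fun e => pvCell e.2 == c) := by
  have h : pvGrid ListeA =
      ((PySem.List.enumerate ListeA 0).map (fun e => (pvCell e.2, e))).foldl
        (fun d p => d.modify p.1 [] (· ++ [p.2])) PySem.Dict.empty := by
    rw [List.foldl_map]
    rfl
  rw [h, PySem.Dict.getD_foldl_modify_append]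
  simp [List.filter_map, Function.comp_def]

theorem pvQuery_eq_fold_cand (ListeA : List (Int × Int)) (b : Int × Int) :
    pvQuery (pvGrid ListeA) b = (pvCand ListeA b).foldl (pvStep b) none := by
  unfold pvQuery pvCand pvOffs
  simp only [List.foldl_cons, List.foldl_nil, List.flatMap_cons, List.flatMap_nil,
    List.append_nil, List.foldl_append, pvGrid_getD]

-- a matching point's cell is one of the 9 neighbour cells of b's cell
theorem pvCell_near (b p : Int × Int) (h : pvClose b p = true) :
    ∃ o ∈ pvOffs, pvCell p = ((pvCell b).1 + o.1, (pvCell b).2 + o.2) := by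
  simp only [pvClose, Bool.and_eq_true, decide_eq_true_eq] at h
  obtain ⟨h1, h2⟩ := h
  have e1 := PySem.Int.floordiv_mul_add_mod b.1 3
  have e2 := PySem.Int.floordiv_mul_add_mod p.1 3
  have e3 := PySem.Int.floordiv_mul_add_mod b.2 3
  have e4 := PySem.Int.floordiv_mul_add_mod p.2 3
  have m1 := PySem.Int.mod_nonneg b.1 (b := 3) (by norm_num)
  have m2 := PySem.Int.mod_nonneg p.1 (b := 3) (by norm_num)
  have m3 := PySem.Int.mod_nonneg b.2 (b := 3) (by norm_num)
  have m4 := PySem.Int.mod_nonneg p.2 (b := 3) (by norm_num)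
  have l1 := PySem.Int.mod_lt b.1 (b := 3) (by norm_num)
  have l2 := PySem.Int.mod_lt p.1 (b := 3) (by norm_num)
  have l3 := PySem.Int.mod_lt b.2 (b := 3) (by norm_num)
  have l4 := PySem.Int.mod_lt p.2 (b := 3) (by norm_num)
  have dx : PySem.Int.floordiv p.1 3 - PySem.Int.floordiv b.1 3 = -1 ∨
            PySem.Int.floordiv p.1 3 - PySem.Int.floordiv b.1 3 = 0 ∨
            PySem.Int.floordiv p.1 3 - PySem.Int.floordiv b.1 3 = 1 := by omega
  have dy : PySem.Int.floordiv p.2 3 - PySem.Int.floordiv b.2 3 = -1 ∨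
            PySem.Int.floordiv p.2 3 - PySem.Int.floordiv b.2 3 = 0 ∨
            PySem.Int.floordiv p.2 3 - PySem.Int.floordiv b.2 3 = 1 := by omega
  refine ⟨(PySem.Int.floordiv p.1 3 - PySem.Int.floordiv b.1 3,
           PySem.Int.floordiv p.2 3 - PySem.Int.floordiv b.2 3), ?_, ?_⟩
  · unfold pvOffs
    rcases dx with h|h|h <;> rcases dy with h'|h'|h' <;> simp only [h, h'] <;> decide
  · simp only [pvCell, Prod.mk.injEq]; constructor <;> omega

theorem pvCand_sub (ListeA : List (Int × Int)) (b : Int × Int) (e : Int × (Int × Int))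
    (h : e ∈ pvCand ListeA b) : e ∈ PySem.List.enumerate ListeA 0 := by
  simp only [pvCand, List.mem_flatMap] at h
  obtain ⟨o, _, hmem⟩ := h
  exact (List.mem_filter.mp hmem).1

theorem pvCand_cover (ListeA : List (Int × Int)) (b : Int × Int) (e : Int × (Int × Int))
    (he : e ∈ PySem.List.enumerate ListeA 0) (hc : pvClose b e.2 = true) :
    e ∈ pvCand ListeA b := by
  obtain ⟨o, ho, hcell⟩ := pvCell_near b e.2 hc
  simp only [pvCand, List.mem_flatMap]
  exact ⟨o, ho, List.mem_filter.mpr ⟨he, by simp [hcell]⟩⟩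

-- best-fold facts
theorem pvBf_some (b : Int × Int) (l : List (Int × (Int × Int))) (a : Int × (Int × Int)) :
    ∃ r, l.foldl (pvStep b) (some a) = some r ∧ a.1 ≤ r.1 := by
  induction l generalizing a with
  | nil => exact ⟨a, rfl, le_refl _⟩
  | cons e l ih =>
    simp only [List.foldl_cons, pvStep]
    by_cases h : (pvClose b e.2 && decide (a.1 < e.1)) = true
    · simp only [h, if_true]
      obtain ⟨r, hr, hle⟩ := ih e
      simp only [Bool.and_eq_true, decide_eq_true_eq] at h
      exact ⟨r, hr, le_of_lt (lt_of_lt_of_le h.2 hle)⟩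
    · simp only [h]
      exact ih a

theorem pvBf_mem (b : Int × Int) (l : List (Int × (Int × Int))) (acc : Option (Int × (Int × Int))) :
    l.foldl (pvStep b) acc = acc ∨
      ∃ e ∈ l, pvClose b e.2 = true ∧ l.foldl (pvStep b) acc = some e := by
  induction l generalizing acc with
  | nil => exact Or.inl rfl
  | cons e l ih =>
    simp only [List.foldl_cons]
    by_cases h : (pvClose b e.2 && (match acc with | none => true | some f => decide (f.1 < e.1))) = true
    · right
      have hstep : pvStep b acc e = some e := by simp [pvStep, h]
      rw [hstep]
      rcases ih (some e) with h1 | ⟨f, hf, hcf, hfold⟩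
      · exact ⟨e, List.mem_cons_self, (Bool.and_eq_true .. ▸ h).1, h1⟩
      · exact ⟨f, List.mem_cons_of_mem _ hf, hcf, hfold⟩
    · have hstep : pvStep b acc e = acc := by simp [pvStep, h]
      rw [hstep]
      rcases ih acc with h1 | ⟨f, hf, hcf, hfold⟩
      · exact Or.inl h1
      · exact Or.inr ⟨f, List.mem_cons_of_mem _ hf, hcf, hfold⟩

theorem pvBf_ge (b : Int × Int) (l : List (Int × (Int × Int))) (acc : Option (Int × (Int × Int)))
    (e : Int × (Int × Int)) (he : e ∈ l) (hc : pvClose b e.2 = true) :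
    ∃ r, l.foldl (pvStep b) acc = some r ∧ e.1 ≤ r.1 := by
  induction l generalizing acc with
  | nil => cases he
  | cons q l ih =>
    simp only [List.foldl_cons]
    rcases List.mem_cons.mp he with rfl | hmem
    · cases acc with
      | none =>
        have hstep : pvStep b none e = some e := by simp [pvStep, hc]
        rw [hstep]; exact pvBf_some b l e
      | some a =>
        by_cases hlt : a.1 < e.1
        · have hstep : pvStep b (some a) e = some e := by simp [pvStep, hc, hlt]
          rw [hstep]; exact pvBf_some b l e
        · have hstep : pvStep b (some a) e = some a := by simp [pvStep, hlt]
          rw [hstep]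
          obtain ⟨r, hr, hle⟩ := pvBf_some b l a
          exact ⟨r, hr, by omega⟩
    · exact ih (pvStep b acc q) hmem

-- the last element of a list whose first components strictly increase has the largest index
theorem pvGetLast_max (M : List (Int × (Int × Int))) (m : Int × (Int × Int))
    (hp : M.Pairwise (fun e f => e.1 < f.1)) (h : M.getLast? = some m) :
    ∀ x ∈ M, x.1 ≤ m.1 := by
  induction M with
  | nil => intro x hx; cases hx
  | cons a M ih =>
    intro x hx
    cases M with
    | nil =>
      simp only [List.getLast?_singleton, Option.some.injEq] at h
      rcases List.mem_singleton.mp hx with rfl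
      rw [h]
    | cons c M' =>
      rw [List.getLast?_cons_cons] at h
      have hm : m ∈ c :: M' := List.mem_of_getLast? h
      rcases List.mem_cons.mp hx with rfl | hx'
      · have := (List.pairwise_cons.mp hp).1 m hm
        omega
      · exact ih (List.pairwise_cons.mp hp).2 h x hx'

-- entries of enumerate are determined by their index
theorem pvEnum_inj (ListeA : List (Int × Int)) (e f : Int × (Int × Int))
    (he : e ∈ PySem.List.enumerate ListeA 0) (hf : f ∈ PySem.List.enumerate ListeA 0)
    (h : e.1 = f.1) : e = f := by
  rw [PySem.List.mem_enumerate_iff] at he hf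
  obtain ⟨k, hk, rfl⟩ := he
  obtain ⟨k', hk', rfl⟩ := hf
  simp only [zero_add] at h ⊢
  have : k = k' := by exact_mod_cast h
  subst this
  rfl

-- the 9-cell query returns exactly the last match over enumerate(ListeA)
theorem pvQuery_eq_lm (ListeA : List (Int × Int)) (b : Int × Int) :
    pvQuery (pvGrid ListeA) b =
      ((PySem.List.enumerate ListeA 0).filter (fun e => pvClose b e.2)).getLast? := by
  rw [pvQuery_eq_fold_cand]
  have hpE : (PySem.List.enumerate ListeA 0).Pairwise (fun e f => e.1 < f.1) :=
    PySem.List.pairwise_lt_enumerate ListeA 0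
  have hpM : ((PySem.List.enumerate ListeA 0).filter (fun e => pvClose b e.2)).Pairwise
      (fun e f => e.1 < f.1) := hpE.sublist List.filter_sublist
  cases hM : ((PySem.List.enumerate ListeA 0).filter (fun e => pvClose b e.2)).getLast? with
  | none =>
    have hnil : (PySem.List.enumerate ListeA 0).filter (fun e => pvClose b e.2) = [] :=
      List.getLast?_eq_none_iff.mp hM
    have hnomatch : ∀ e ∈ pvCand ListeA b, pvClose b e.2 ≠ true := by
      intro e he hc
      have : e ∈ (PySem.List.enumerate ListeA 0).filter (fun e => pvClose b e.2) :=
        List.mem_filter.mpr ⟨pvCand_sub ListeA b e he, hc⟩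
      rw [hnil] at this; cases this
    rcases pvBf_mem b (pvCand ListeA b) none with h1 | ⟨e, he, hce, _⟩
    · exact h1
    · exact absurd hce (hnomatch e he)
  | some m =>
    have hmM : m ∈ (PySem.List.enumerate ListeA 0).filter (fun e => pvClose b e.2) :=
      List.mem_of_getLast? hM
    have hmE := (List.mem_filter.mp hmM).1
    have hmc : pvClose b m.2 = true := (List.mem_filter.mp hmM).2
    have hmC : m ∈ pvCand ListeA b := pvCand_cover ListeA b m hmE hmc
    obtain ⟨r, hr, hmr⟩ := pvBf_ge b (pvCand ListeA b) none m hmC hmc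
    rcases pvBf_mem b (pvCand ListeA b) none with h1 | ⟨e, he, hce, hfold⟩
    · rw [h1] at hr; cases hr
    · rw [hfold] at hr ⊢
      obtain rfl : e = r := Option.some.inj hr
      have heM : e ∈ (PySem.List.enumerate ListeA 0).filter (fun e => pvClose b e.2) :=
        List.mem_filter.mpr ⟨pvCand_sub ListeA b e he, hce⟩
      have hle := pvGetLast_max _ m hpM hM e heM
      have : e = m := pvEnum_inj ListeA e m (pvCand_sub ListeA b e he) hmE (by omega)
      rw [this]

-- A's inner loop applies the last match (if any) once
theorem pvInner_eq (ListeA : List (Int × Int)) (b : Int × Int) (k : Nat)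
    (cur : List (Int × Int)) :
    ListeA.foldl (fun Bc p =>
        if (b.1 - p.1).natAbs < 3 ∧ (b.2 - p.2).natAbs < 3 then Bc.set k p else Bc) cur
      = match (ListeA.filter (pvClose b)).getLast? with
        | none => cur
        | some p => cur.set k p := by
  induction ListeA generalizing cur with
  | nil => rfl
  | cons q l ih =>
    simp only [List.foldl_cons]
    by_cases hq : pvClose b q = true
    · have hprop : (b.1 - q.1).natAbs < 3 ∧ (b.2 - q.2).natAbs < 3 := by
        simpa [pvClose] using hq
      rw [if_pos hprop, ih,
        show (q::l).filter (pvClose b) = q :: l.filter (pvClose b) from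
          List.filter_cons_of_pos hq]
      cases hfl : l.filter (pvClose b) with
      | nil => simp
      | cons x xs =>
        cases hlast : (x :: xs).getLast? with
        | none => simp [List.getLast?_eq_none_iff] at hlast
        | some y => simp [hlast, List.set_set]
    · have hprop : ¬((b.1 - q.1).natAbs < 3 ∧ (b.2 - q.2).natAbs < 3) := by
        simpa [pvClose] using hq
      rw [if_neg hprop, ih,
        show (q::l).filter (pvClose b) = l.filter (pvClose b) from
          List.filter_cons_of_neg (by simp [hq])]

-- the filtered last-match over points equals the one over enumerated entries, projected
theorem pvFilter_snd (ListeA : List (Int × Int)) (b : Int × Int) :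
    (ListeA.filter (pvClose b)).getLast? =
      (((PySem.List.enumerate ListeA 0).filter (fun e => pvClose b e.2)).getLast?).map (·.2) := by
  conv_lhs => rw [show ListeA = (PySem.List.enumerate ListeA 0).map (·.2) from
    (PySem.List.map_snd_enumerate ListeA 0).symm]
  rw [List.filter_map, List.getLast?_map]
  rfl

-- ===== VERDICT (by name: the statement is the Claim_ definition above) =====
theorem remplace_spec : Claim_equal_remplace := by
  intro ListeA ListeB _
  unfold Spec_remplace
  show remplace ListeA ListeB = remplace_alt ListeA ListeB
  unfold remplace remplace_alt
  have hf : (fun (Bc : List (Int × Int)) (k : Nat) =>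
      match Bc[k]? with
      | none => Bc
      | some b =>
        ListeA.foldl (fun Bc p =>
          if (b.1 - p.1).natAbs < 3 ∧ (b.2 - p.2).natAbs < 3 then Bc.set k p else Bc) Bc)
      = (fun (Bc : List (Int × Int)) (k : Nat) =>
      match Bc[k]? with
      | none => Bc
      | some b =>
        match pvQuery (pvGrid ListeA) b with
        | none => Bc
        | some e => Bc.set k e.2) := by
    funext Bc k
    cases h : Bc[k]? with
    | none => rfl
    | some b =>
      simp only []
      rw [pvInner_eq, pvFilter_snd, pvQuery_eq_lm]
      cases ((PySem.List.enumerate ListeA 0).filter (fun e => pvClose b e.2)).getLast? <;> rfl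
  rw [hf]
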